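-- pv_equiv track=rewrite | github.com/dineshpanchananam/EPIJudge | epi_judge_python/max_product_all_but_one.py | find_biggest_n_minus_one_product
-- ===== SOURCE A (Python) =====
-- from typing import List
--
-- def find_biggest_n_minus_one_product(A: List[int]) -> int:
--   suff, s = [1], 1
--   for i in reversed(A):
--     s *= i
--     suff.append(s)
--   suff.reverse()
--   pfx_prd, ans = 1, float('-inf')
--   for i in range(len(A)):
--     ans = max(ans, pfx_prd*suff[i+1])
--     pfx_prd *= A[i]
--   return ans
-- ===== SOURCE B (Python) =====
-- def find_biggest_n_minus_one_product(A):
--     # Return value equivalence proved for nonempty A (on [] the original returns float('-inf'), not an int).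
--     if not A:
--         return float('-inf')
--     zeros = 0
--     prod = 1  # product of the nonzero elements
--     for x in A:
--         if x == 0:
--             zeros += 1
--         else:
--             prod *= x
--     if zeros >= 2:
--         return 0
--     if zeros == 1:
--         return max(prod, 0)
--     return max(prod // x for x in A)
-- ===== Notes on version B (the rewrite author's own statement) =====
-- stated objective: alternative
-- what changed: Replaces the suffix-product array plus prefix/suffix scan with a single pass counting zeros and multiplying nonzero elements, then derives the answer by case analysis on the zero count (exact division by each element when there is no zero).
-- outside the precondition, e.g. on find_biggest_n_minus_one_product([]): A returns -inf, B returns -inf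
import Mathlib
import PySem

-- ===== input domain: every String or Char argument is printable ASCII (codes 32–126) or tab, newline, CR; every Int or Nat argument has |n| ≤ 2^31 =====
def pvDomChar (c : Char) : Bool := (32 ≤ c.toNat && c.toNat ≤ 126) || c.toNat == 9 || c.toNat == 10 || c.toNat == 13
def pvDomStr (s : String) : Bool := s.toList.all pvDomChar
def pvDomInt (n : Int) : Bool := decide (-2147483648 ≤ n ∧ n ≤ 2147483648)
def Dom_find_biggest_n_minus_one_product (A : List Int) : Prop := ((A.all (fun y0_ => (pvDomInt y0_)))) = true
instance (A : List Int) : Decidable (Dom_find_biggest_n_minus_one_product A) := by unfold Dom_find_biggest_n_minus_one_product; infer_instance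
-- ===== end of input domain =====

-- B replaces A's suffix-product array and prefix scan by a single zero-counting/nonzero-product
-- pass plus a case analysis on the zero count (exact division when there is no zero); the
-- equivalence is about the return value on nonempty inputs (on [] Python A returns
-- float('-inf'), which is not an int, so Pre_ excludes it).

-- ===== PORT A =====
-- suff, s = [1], 1; for i in reversed(A): s *= i; suff.append(s)
def pyAsuffFold (A : List Int) : List Int × Int :=
  A.reverse.foldl (fun st i => (st.1 ++ [st.2 * i], st.2 * i)) ([1], 1)

def find_biggest_n_minus_one_product (A : List Int) : Int :=
  let suff := (pyAsuffFold A).1.reverse   -- suff.reverse()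
  -- pfx_prd, ans = 1, float('-inf'); ans is modelled as Option Int, none = float('-inf').
  -- A[i] and suff[i+1] are always in range for i in range(len(A)), so getD is exact here.
  let st := (List.range A.length).foldl (fun (st : Int × Option Int) i =>
      (st.1 * A.getD i 0,
       some (match st.2 with
             | none => st.1 * suff.getD (i + 1) 0
             | some a => max a (st.1 * suff.getD (i + 1) 0)))) (1, none)
  st.2.getD 0   -- the none case (empty A, Python's float('-inf')) is excluded by Pre_

-- ===== PORT B =====
def find_biggest_n_minus_one_product_alt (A : List Int) : Int :=
  if A = [] then 0 else   -- Python B returns float('-inf') here; excluded by Pre_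
  -- one pass: count of zeros and product of the nonzero elements
  let zp : Nat × Int := A.foldl (fun st x =>
      if x = 0 then (st.1 + 1, st.2) else (st.1, st.2 * x)) (0, 1)
  if 2 ≤ zp.1 then 0
  else if zp.1 = 1 then max zp.2 0
  else (PySem.List.max? (A.map (fun x => PySem.Int.floordiv zp.2 x)) (fun y => y)).getD 0

-- ===== PRECONDITION & SPEC =====
-- Pre_ excludes only the empty list, on which Python A returns float('-inf'), not an int.
def Pre_find_biggest_n_minus_one_product (A : List Int) : Prop := A ≠ []
instance (A : List Int) : Decidable (Pre_find_biggest_n_minus_one_product A) := by unfold Pre_find_biggest_n_minus_one_product; infer_instance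
def pvWitness_find_biggest_n_minus_one_product : List Int := [2, -3]

def Spec_find_biggest_n_minus_one_product (A : List Int) (out : Int) : Prop := out = find_biggest_n_minus_one_product_alt A
instance (A : List Int) (out : Int) : Decidable (Spec_find_biggest_n_minus_one_product A out) := by unfold Spec_find_biggest_n_minus_one_product; infer_instance

-- ===== CLAIM (what is proved, stated in full; the proofs are below) =====
def Claim_equal_find_biggest_n_minus_one_product : Prop := ∀ (A : List Int), Dom_find_biggest_n_minus_one_product A → Pre_find_biggest_n_minus_one_product A → Spec_find_biggest_n_minus_one_product A (find_biggest_n_minus_one_product A)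

-- ===== LEMMAS AND PROOFS =====

-- product of A with element i removed: the common value both loops maximise
def pvCand (A : List Int) (i : Nat) : Int := (A.take i).prod * (A.drop (i + 1)).prod
def pvCands (A : List Int) : List Int := (List.range A.length).map (pvCand A)

def pvOmaxStep (o : Option Int) (x : Int) : Option Int :=
  some (match o with | none => x | some a => max a x)
def pvOmax (L : List Int) : Option Int := L.foldl pvOmaxStep none

lemma pvOmax_some (L : List Int) : ∀ a : Int, L.foldl pvOmaxStep (some a) = some (L.foldl max a) := by
  induction L with
  | nil => intro a; rfl
  | cons h t ih => intro a; simp [List.foldl, pvOmaxStep, ih]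

lemma pvOmax_eq_max? (L : List Int) :
    pvOmax L = PySem.List.max? L (fun y => y) := by
  cases L with
  | nil => rfl
  | cons h t => simp [pvOmax, List.foldl, pvOmaxStep, pvOmax_some, PySem.List.max?_id_cons]

lemma pvFold1 (L : List Int) : ∀ (acc : List Int) (s : Int),
    L.foldl (fun st i => (st.1 ++ [st.2 * i], st.2 * i)) (acc, s) =
      (acc ++ (List.range L.length).map (fun k => s * (L.take (k + 1)).prod), s * L.prod) := by
  induction L with
  | nil => intro acc s; simp
  | cons h t ih =>
    intro acc s
    simp only [List.foldl, ih]
    rw [Prod.mk.injEq]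
    refine ⟨?_, by simp [mul_assoc]⟩
    rw [List.append_assoc]
    congr 1
    simp only [List.length_cons, List.range_succ_eq_map, List.map_cons, List.map_map]
    simp [Function.comp_def, mul_assoc]

lemma pv_max?_id_unique {L : List Int} {b : Int} (hm : b ∈ L) (hub : ∀ x ∈ L, x ≤ b) :
    PySem.List.max? L (fun y => y) = some b := by
  obtain ⟨m, hM⟩ : ∃ m, PySem.List.max? L (fun y => y) = some m := by
    cases hL : PySem.List.max? L (fun y => y) with
    | none => rw [PySem.List.max?_eq_none_iff] at hL; subst hL; simp at hm
    | some m => exact ⟨m, rfl⟩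
  have h1 := PySem.List.max?_mem hM
  have h2 := PySem.List.max?_isMax hM b hm
  rw [hM]
  exact congrArg some (le_antisymm (hub m h1) h2)

lemma pvSuffList (A : List Int) :
    (pyAsuffFold A).1 = (List.range (A.length + 1)).map (fun k => (A.reverse.take k).prod) := by
  rw [pyAsuffFold, pvFold1]
  simp only [List.range_succ_eq_map, List.map_cons, List.map_map]
  simp [Function.comp_def, List.length_reverse]

lemma pvSuff_getD (A : List Int) (j : Nat) (hj : j ≤ A.length) :
    ((pyAsuffFold A).1.reverse).getD j 0 = (A.drop j).prod := by
  rw [pvSuffList]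
  have hlen : ((List.range (A.length + 1)).map (fun k => (A.reverse.take k).prod)).length = A.length + 1 := by simp
  rw [List.getD_eq_getElem?_getD, List.getElem?_eq_getElem (by simp [hlen]; omega)]
  simp only [List.getElem_reverse, hlen]
  rw [List.getElem_map, List.getElem_range]
  have h1 : A.length + 1 - 1 - j = A.length - j := by omega
  rw [h1]
  have h2 : A.reverse.take (A.length - j) = (A.drop j).reverse := by
    rw [List.take_reverse]
    have h3 : A.length - (A.length - j) = j := by omega
    rw [h3]
  simp [h2]

lemma pvLoop2 (A suff : List Int)
    (hs : ∀ i, i < A.length → suff.getD (i + 1) 0 = (A.drop (i + 1)).prod) :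
    ∀ n, n ≤ A.length →
      (List.range n).foldl (fun (st : Int × Option Int) i =>
        (st.1 * A.getD i 0,
         some (match st.2 with
               | none => st.1 * suff.getD (i + 1) 0
               | some a => max a (st.1 * suff.getD (i + 1) 0)))) (1, none) =
      ((A.take n).prod, pvOmax ((List.range n).map (pvCand A))) := by
  intro n
  induction n with
  | zero => intro _; simp [pvOmax]
  | succ n ih =>
    intro hn
    rw [List.range_succ, List.foldl_append, ih (by omega), List.map_append]
    have hlt : n < A.length := by omega
    rw [Prod.mk.injEq]
    constructor
    · simp only [List.foldl]
      rw [List.getD_eq_getElem?_getD, List.getElem?_eq_getElem hlt]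
      rw [List.take_succ, List.prod_append]
      simp [List.getElem?_eq_getElem hlt]
    · simp only [List.foldl, List.map_cons, List.map_nil, pvOmax]
      rw [List.foldl_append]
      simp only [List.foldl]
      rw [hs n hlt]
      rcases h : ((List.range n).map (pvCand A)).foldl pvOmaxStep none with _ | a <;>
        simp [pvOmaxStep, pvCand]

lemma pvA_char (A : List Int) :
    find_biggest_n_minus_one_product A = (PySem.List.max? (pvCands A) (fun y => y)).getD 0 := by
  rw [find_biggest_n_minus_one_product]
  rw [pvLoop2 A ((pyAsuffFold A).1.reverse)
      (fun i hi => pvSuff_getD A (i + 1) (by omega)) A.length (le_refl _)]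
  rw [pvCands, pvOmax_eq_max?]

lemma pvBfold (A : List Int) : ∀ (z : Nat) (p : Int),
    A.foldl (fun (st : Nat × Int) x => if x = 0 then (st.1 + 1, st.2) else (st.1, st.2 * x)) (z, p) =
      (z + A.countP (fun x => x == 0), p * (A.filter (fun x => !(x == 0))).prod) := by
  induction A with
  | nil => intro z p; simp
  | cons h t ih =>
    intro z p
    by_cases h0 : h = 0
    · simp [List.foldl, h0, ih, List.countP_cons, List.filter_cons]
      omega
    · simp only [List.foldl, if_neg h0]
      rw [ih]
      simp [List.filter_cons, h0, List.countP_cons, mul_assoc, mul_comm, mul_left_comm]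

lemma pvSplit (A : List Int) (i : Nat) (hi : i < A.length) :
    A = A.take i ++ A[i] :: A.drop (i + 1) := by
  conv_lhs => rw [← List.take_append_drop i A]
  congr 1
  rw [List.drop_eq_getElem_cons hi]

lemma pvCountP_split (A : List Int) (i : Nat) (hi : i < A.length) :
    A.countP (fun x => x == 0) =
      (A.take i).countP (fun x => x == 0) + (if A[i] = 0 then 1 else 0)
        + (A.drop (i + 1)).countP (fun x => x == 0) := by
  conv_lhs => rw [pvSplit A i hi]
  rw [List.countP_append, List.countP_cons]
  by_cases h : A[i] = 0 <;> simp [h] <;> omega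

lemma pvProd_zero_of_count (L : List Int) (h : 1 ≤ L.countP (fun x => x == 0)) :
    L.prod = 0 := by
  have : ∃ x ∈ L, (x == 0) = true := List.countP_pos_iff.mp (by omega)
  obtain ⟨x, hx, he⟩ := this
  have : x = 0 := by simpa using he
  subst this
  exact List.prod_eq_zero hx

lemma pvCand_eq_zero_of_other_zero (A : List Int) (i : Nat) (hi : i < A.length)
    (h : ¬ (A[i] = 0) ∨ 2 ≤ A.countP (fun x => x == 0))
    (hz : 1 ≤ A.countP (fun x => x == 0)) :
    pvCand A i = 0 := by
  have hsplit := pvCountP_split A i hi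
  have : 1 ≤ (A.take i).countP (fun x => x == 0) ∨ 1 ≤ (A.drop (i+1)).countP (fun x => x == 0) := by
    rcases h with h | h
    · simp [h] at hsplit; omega
    · by_cases h0 : A[i] = 0 <;> simp [h0] at hsplit <;> omega
  rcases this with h1 | h1
  · simp [pvCand, pvProd_zero_of_count _ h1]
  · simp [pvCand, pvProd_zero_of_count _ h1]

lemma pvCand_of_zero_at (A : List Int) (i : Nat) (hi : i < A.length)
    (hz : A[i] = 0) (hc : A.countP (fun x => x == 0) = 1) :
    pvCand A i = (A.filter (fun x => !(x == 0))).prod := by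
  have hsplit := pvCountP_split A i hi
  simp [hz] at hsplit
  have ht : (A.take i).countP (fun x => x == 0) = 0 := by omega
  have hd : (A.drop (i+1)).countP (fun x => x == 0) = 0 := by omega
  have hft : (A.take i).filter (fun x => !(x == 0)) = A.take i := by
    rw [List.filter_eq_self]
    intro a ha
    have := List.countP_eq_zero.mp ht a ha
    simpa using this
  have hfd : (A.drop (i+1)).filter (fun x => !(x == 0)) = A.drop (i+1) := by
    rw [List.filter_eq_self]
    intro a ha
    have := List.countP_eq_zero.mp hd a ha
    simpa using this
  conv_rhs => rw [pvSplit A i hi]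
  rw [List.filter_append, List.filter_cons]
  simp [hz, hft, hfd, pvCand]

lemma pvFloordiv_cancel (c x : Int) (hx : x ≠ 0) : PySem.Int.floordiv (c * x) x = c := by
  have hdvd : x ∣ c * x := Dvd.dvd.mul_left (dvd_refl x) c
  have hmod : PySem.Int.mod (c * x) x = 0 := (PySem.Int.mod_eq_zero_iff_dvd _ _).mpr hdvd
  have := PySem.Int.floordiv_mul_add_mod (c * x) x
  rw [hmod, add_zero] at this
  exact mul_right_cancel₀ hx (by linarith)

lemma pvMain (A : List Int) (hA : A ≠ []) :
    find_biggest_n_minus_one_product A = find_biggest_n_minus_one_product_alt A := by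
  have hlen : 0 < A.length := List.length_pos_iff.mpr hA
  rw [pvA_char, find_biggest_n_minus_one_product_alt, if_neg hA]
  rw [pvBfold A 0 1]
  simp only [zero_add, one_mul]
  set c0 := A.countP (fun x => x == 0) with hc0
  set nz := (A.filter (fun x => !(x == 0))).prod with hnz
  by_cases h2 : 2 ≤ c0
  · rw [if_pos h2]
    rw [pv_max?_id_unique (b := 0) ?_ ?_]
    · rfl
    · have : pvCand A 0 = 0 :=
        pvCand_eq_zero_of_other_zero A 0 hlen (Or.inr h2) (by omega)
      rw [pvCands] at *
      exact this ▸ List.mem_map.mpr ⟨0, List.mem_range.mpr hlen, rfl⟩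
    · intro x hx
      obtain ⟨i, hi, rfl⟩ := List.mem_map.mp hx
      rw [List.mem_range] at hi
      rw [pvCand_eq_zero_of_other_zero A i hi (Or.inr h2) (by omega)]
  · rw [if_neg h2]
    by_cases h1 : c0 = 1
    · rw [if_pos h1]
      -- upper bound
      have hub : ∀ x ∈ pvCands A, x ≤ max nz 0 := by
        intro x hx
        obtain ⟨i, hi, rfl⟩ := List.mem_map.mp hx
        rw [List.mem_range] at hi
        by_cases h0 : A[i] = 0
        · rw [pvCand_of_zero_at A i hi h0 h1]; exact le_max_left _ _
        · rw [pvCand_eq_zero_of_other_zero A i hi (Or.inl h0) (by omega)]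
          exact le_max_right _ _
      have hmem : max nz 0 ∈ pvCands A := by
        by_cases hsgn : 0 ≤ nz
        · obtain ⟨a, ha, he⟩ := List.countP_pos_iff.mp (show 0 < c0 by omega)
          have ha0 : a = 0 := by simpa using he
          obtain ⟨i, hi, rfl⟩ := List.mem_iff_getElem.mp ha
          rw [max_eq_left hsgn]
          rw [hnz, ← pvCand_of_zero_at A i hi ha0 h1]
          exact List.mem_map.mpr ⟨i, List.mem_range.mpr hi, rfl⟩
        · -- nz < 0, so some element is nonzero (else filter = [] and nz = 1)
          have hex : ∃ a ∈ A, a ≠ 0 := by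
            by_contra hno
            push_neg at hno
            have : A.filter (fun x => !(x == 0)) = [] := by
              rw [List.filter_eq_nil_iff]
              intro a ha
              simp [hno a ha]
            rw [hnz, this] at hsgn
            simp at hsgn
          obtain ⟨a, ha, ha0⟩ := hex
          obtain ⟨i, hi, rfl⟩ := List.mem_iff_getElem.mp ha
          rw [max_eq_right (le_of_not_ge hsgn)]
          have := pvCand_eq_zero_of_other_zero A i hi (Or.inl ha0) (by omega)
          exact this ▸ List.mem_map.mpr ⟨i, List.mem_range.mpr hi, rfl⟩
      rw [pv_max?_id_unique hmem hub]
      rfl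
    · -- no zeros
      have hc00 : c0 = 0 := by omega
      have hfilt : A.filter (fun x => !(x == 0)) = A := by
        rw [List.filter_eq_self]
        intro a ha
        have := List.countP_eq_zero.mp hc00 a ha
        simpa using this
      have hnzA : nz = A.prod := by rw [hnz, hfilt]
      have hmap : A.map (fun x => PySem.Int.floordiv nz x) = pvCands A := by
        apply List.ext_getElem (by simp [pvCands])
        intro i hi1 hi2
        simp only [List.getElem_map, pvCands, List.getElem_range]
        have hilen : i < A.length := by simpa using hi1
        have hA0 : A[i] ≠ 0 := by
          intro h0
          have : 0 < c0 := List.countP_pos_iff.mpr ⟨A[i], List.getElem_mem hilen, by simp [h0]⟩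
          omega
        have hprod : nz = pvCand A i * A[i] := by
          rw [hnzA]
          conv_lhs => rw [pvSplit A i hilen]
          rw [List.prod_append, List.prod_cons, pvCand]
          ring
        have hgoal : PySem.Int.floordiv nz A[i] = pvCand A i := by
          rw [hprod]; exact pvFloordiv_cancel _ _ hA0
        exact hgoal
      rw [if_neg h1, hmap]

-- ===== VERDICT (by name: the statement is the Claim_ definition above) =====
theorem find_biggest_n_minus_one_product_spec : Claim_equal_find_biggest_n_minus_one_product := by
  intro A _ hPre
  unfold Spec_find_biggest_n_minus_one_product
  exact pvMain A hPre
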